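-- pv_equiv track=rewrite | github.com/tomas-jackson/iic2233-spring-2023 | Tareas/T0 - Intro a Prog./functions.py | verificar_tortugas
-- ===== SOURCE A (Python) =====
-- def check_up(tablero, row, col):
--     if row == 0:
--         return False
--     elif tablero[row - 1][col] == 'T':
--         return True
--     return False
--
-- def check_left(tablero, row, col):
--     if col == 0:
--         return False
--     elif 'T' == tablero[row][col - 1]:
--         return True
--     return False
--
-- def check_right(tablero, row, col):
--     if col == len(tablero) - 1:
--         return False
--     elif 'T' == tablero[row][col + 1]:
--         return True
--     return False
--
-- def check_down(tablero: list, row: int, col: int) -> bool: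
--     if row == len(tablero) - 1:
--         return False
--     elif tablero[row + 1][col] == 'T':
--         return True
--     return False
--
-- def verificar_una_celda(tablero: list, coord: tuple) -> bool:
--     """
--     verifica si las celdas arriba, abajo o a los lados de una celda en especifico son iguales,
--     retorna True si no la rodea ninguna igual, False si es que si
--     """
--     up = check_up(tablero, coord[0], coord[1])
--     down = check_down(tablero, coord[0], coord[1])
--     left = check_left(tablero, coord[0], coord[1])
--     right = check_right(tablero, coord[0], coord[1])
--     answers = [up, down, left, right]
--     if True in answers:
--         return False
--     return True
--
-- def verificar_tortugas(tablero: list) -> int: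
--     """
--     verifica la cantidad de tortugas invalidas en el tablero, o sea, tortugas directamente arriba, a
--     bajo o a los lados de otra tortuga, recibe el tablero de juego
--     y retorna la cantidad de tortugas invalidas
--     """
--     invalid = 0
--     for row_num in range(len(tablero)):
--         for col_num in range(len(tablero)):
--             if tablero[row_num][col_num] == 'T':
--                 answer = verificar_una_celda(tablero, (row_num, col_num))
--                 if answer is False:
--                     invalid += 1
--     return invalid
-- ===== SOURCE B (Python) =====
-- def verificar_tortugas(tablero):
--     n = len(tablero)
--     invalid = set()
--     for r in range(n):
--         for c in range(n - 1):
--             if tablero[r][c] == 'T' and tablero[r][c + 1] == 'T':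
--                 invalid.add((r, c))
--                 invalid.add((r, c + 1))
--     for r in range(n - 1):
--         for c in range(n):
--             if tablero[r][c] == 'T' and tablero[r + 1][c] == 'T':
--                 invalid.add((r, c))
--                 invalid.add((r + 1, c))
--     return len(invalid)
-- ===== Notes on version B (the rewrite author's own statement) =====
-- stated objective: alternative
-- what changed: Instead of a per-cell 4-neighbour check (check_up/down/left/right for every 'T'), B sweeps the horizontal and vertical adjacent pairs of the n-by-n window once, collects both endpoints of every T-T pair in a set, and returns the set's size.
import Mathlib
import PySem

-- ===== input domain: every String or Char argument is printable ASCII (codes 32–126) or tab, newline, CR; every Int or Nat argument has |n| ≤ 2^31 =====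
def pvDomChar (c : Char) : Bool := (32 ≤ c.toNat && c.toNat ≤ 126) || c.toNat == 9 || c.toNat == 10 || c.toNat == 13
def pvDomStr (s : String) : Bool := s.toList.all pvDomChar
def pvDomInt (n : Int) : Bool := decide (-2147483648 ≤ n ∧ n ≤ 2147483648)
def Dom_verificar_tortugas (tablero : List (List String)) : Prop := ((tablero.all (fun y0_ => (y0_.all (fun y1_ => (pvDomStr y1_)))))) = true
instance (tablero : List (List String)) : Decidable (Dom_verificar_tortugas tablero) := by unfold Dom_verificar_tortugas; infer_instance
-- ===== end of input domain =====

-- B replaces A's per-cell four-direction neighbour check by a single sweep over the horizontal and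
-- vertical adjacent pairs of the n×n window, collecting both endpoints of every T-T pair in a set
-- and returning its size (objective: alternative decomposition, same asymptotic cost).

-- ===== PORT A =====
-- tablero[r][c]; on every admitted input the indices are in range, so the total pyGetD form is exact
def pvCell (t : List (List String)) (r c : Int) : String :=
  PySem.List.pyGetD (PySem.List.pyGetD t r []) c ""

def check_up (t : List (List String)) (row col : Int) : Bool :=
  if row == 0 then false
  else if pvCell t (row - 1) col == "T" then true
  else false

def check_left (t : List (List String)) (row col : Int) : Bool :=
  if col == 0 then false
  else if "T" == pvCell t row (col - 1) then true
  else false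

def check_right (t : List (List String)) (row col : Int) : Bool :=
  if col == (t.length : Int) - 1 then false
  else if "T" == pvCell t row (col + 1) then true
  else false

def check_down (t : List (List String)) (row col : Int) : Bool :=
  if row == (t.length : Int) - 1 then false
  else if pvCell t (row + 1) col == "T" then true
  else false

def verificar_una_celda (t : List (List String)) (coord : Int × Int) : Bool :=
  let up := check_up t coord.1 coord.2
  let down := check_down t coord.1 coord.2
  let left := check_left t coord.1 coord.2
  let right := check_right t coord.1 coord.2
  let answers := [up, down, left, right]
  if answers.contains true then false else true

def verificar_tortugas (tablero : List (List String)) : Int :=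
  (PySem.List.pyRange 0 tablero.length 1).foldl (fun invalid row_num =>
    (PySem.List.pyRange 0 tablero.length 1).foldl (fun invalid col_num =>
      if pvCell tablero row_num col_num == "T" then
        if verificar_una_celda tablero (row_num, col_num) = false then invalid + 1 else invalid
      else invalid) invalid) 0

-- ===== PORT B =====
def verificar_tortugas_alt (tablero : List (List String)) : Int :=
  let n : Int := tablero.length
  let invalid : PySem.Set (Int × Int) := PySem.Set.empty
  let invalid := (PySem.List.pyRange 0 n 1).foldl (fun inv r =>
    (PySem.List.pyRange 0 (n - 1) 1).foldl (fun inv c =>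
      if pvCell tablero r c == "T" && pvCell tablero r (c + 1) == "T" then
        PySem.Set.add (PySem.Set.add inv (r, c)) (r, c + 1)
      else inv) inv) invalid
  let invalid := (PySem.List.pyRange 0 (n - 1) 1).foldl (fun inv r =>
    (PySem.List.pyRange 0 n 1).foldl (fun inv c =>
      if pvCell tablero r c == "T" && pvCell tablero (r + 1) c == "T" then
        PySem.Set.add (PySem.Set.add inv (r, c)) (r + 1, c)
      else inv) inv) invalid
  PySem.Set.len invalid

-- ===== PRECONDITION & SPEC =====
-- Pre_ excludes exactly the ragged boards (some row shorter than len(tablero)) on which the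
-- Python A raises IndexError; on every other input A returns normally.
def Pre_verificar_tortugas (tablero : List (List String)) : Prop :=
  ∀ row ∈ tablero, tablero.length ≤ row.length
instance (tablero : List (List String)) : Decidable (Pre_verificar_tortugas tablero) := by
  unfold Pre_verificar_tortugas; infer_instance

def pvWitness_verificar_tortugas : List (List String) := [["T", "T"], ["x", "x"]]

def Spec_verificar_tortugas (tablero : List (List String)) (out : Int) : Prop := out = verificar_tortugas_alt tablero
instance (tablero : List (List String)) (out : Int) : Decidable (Spec_verificar_tortugas tablero out) := by unfold Spec_verificar_tortugas; infer_instance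

-- ===== CLAIM (what is proved, stated in full; the proofs are below) =====
def Claim_equal_verificar_tortugas : Prop := ∀ (tablero : List (List String)), Dom_verificar_tortugas tablero → Pre_verificar_tortugas tablero → Spec_verificar_tortugas tablero (verificar_tortugas tablero)

-- ===== LEMMAS AND PROOFS =====

-- the n×n index grid and the Boolean "invalid turtle" test A applies to each cell
def pvGrid (t : List (List String)) : List (Int × Int) :=
  (PySem.List.pyRange 0 t.length 1) ×ˢ (PySem.List.pyRange 0 t.length 1)

def pvPA (t : List (List String)) (x : Int × Int) : Bool :=
  (pvCell t x.1 x.2 == "T") && (verificar_una_celda t x == false)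

-- the set built by B's two sweeps (definitionally the set in verificar_tortugas_alt)
def pvBSet (t : List (List String)) : PySem.Set (Int × Int) :=
  (PySem.List.pyRange 0 ((t.length : Int) - 1) 1).foldl (fun inv r =>
    (PySem.List.pyRange 0 (t.length : Int) 1).foldl (fun inv c =>
      if pvCell t r c == "T" && pvCell t (r + 1) c == "T" then
        PySem.Set.add (PySem.Set.add inv (r, c)) (r + 1, c)
      else inv) inv)
    ((PySem.List.pyRange 0 (t.length : Int) 1).foldl (fun inv r =>
      (PySem.List.pyRange 0 ((t.length : Int) - 1) 1).foldl (fun inv c =>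
        if pvCell t r c == "T" && pvCell t r (c + 1) == "T" then
          PySem.Set.add (PySem.Set.add inv (r, c)) (r, c + 1)
        else inv) inv) PySem.Set.empty)

theorem pvB_eq_len (t : List (List String)) : verificar_tortugas_alt t = PySem.Set.len (pvBSet t) := rfl

-- B's two pair predicates, as propositions on a coordinate
def pvQH (t : List (List String)) (x : Int × Int) : Prop :=
  ∃ r : Int, (0 ≤ r ∧ r < (t.length : Int)) ∧ ∃ c : Int, (0 ≤ c ∧ c < (t.length : Int) - 1) ∧
    (pvCell t r c = "T" ∧ pvCell t r (c + 1) = "T") ∧ (x = (r, c) ∨ x = (r, c + 1))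

def pvQV (t : List (List String)) (x : Int × Int) : Prop :=
  ∃ r : Int, (0 ≤ r ∧ r < (t.length : Int) - 1) ∧ ∃ c : Int, (0 ≤ c ∧ c < (t.length : Int)) ∧
    (pvCell t r c = "T" ∧ pvCell t (r + 1) c = "T") ∧ (x = (r, c) ∨ x = (r + 1, c))

-- generic: membership through a foldl whose step has a membership characterisation
theorem pv_mem_foldl_step {β : Type} (l : List β) (step : PySem.Set (Int × Int) → β → PySem.Set (Int × Int))
    (P : β → Prop) (x : Int × Int) (h : ∀ s i, x ∈ step s i ↔ x ∈ s ∨ P i) :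
    ∀ s, x ∈ l.foldl step s ↔ x ∈ s ∨ ∃ i ∈ l, P i := by
  induction l with
  | nil => simp
  | cons i l ih =>
    intro s
    rw [List.foldl_cons, ih, h]
    constructor
    · rintro ((h1 | h1) | ⟨j, hj, hp⟩)
      · exact Or.inl h1
      · exact Or.inr ⟨i, by simp, h1⟩
      · exact Or.inr ⟨j, by simp [hj], hp⟩
    · rintro (h1 | ⟨j, hj, hp⟩)
      · exact Or.inl (Or.inl h1)
      · rcases List.mem_cons.mp hj with rfl | hj
        · exact Or.inl (Or.inr hp)
        · exact Or.inr ⟨j, hj, hp⟩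

-- generic: a foldl whose step preserves Nodup preserves Nodup
theorem pv_nodup_foldl_step {β : Type} (l : List β) (step : PySem.Set (Int × Int) → β → PySem.Set (Int × Int))
    (h : ∀ s i, s.Nodup → (step s i).Nodup) :
    ∀ s : PySem.Set (Int × Int), s.Nodup → (l.foldl step s).Nodup := by
  induction l with
  | nil => intro s hs; simpa using hs
  | cons i l ih => intro s hs; exact ih _ (h s i hs)

-- membership through one conditional double-add step
theorem pv_mem_add2 (s : PySem.Set (Int × Int)) (cond : Bool) (u v x : Int × Int) :
    x ∈ (if cond then PySem.Set.add (PySem.Set.add s u) v else s) ↔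
      x ∈ s ∨ (cond = true ∧ (x = u ∨ x = v)) := by
  cases cond
  · simp
  · simp [PySem.Set.mem_add]
    tauto

theorem pv_nodup_add2 (s : PySem.Set (Int × Int)) (cond : Bool) (u v : Int × Int)
    (hs : s.Nodup) : (if cond then PySem.Set.add (PySem.Set.add s u) v else s).Nodup := by
  cases cond
  · simpa using hs
  · simpa using PySem.Set.nodup_add _ _ (PySem.Set.nodup_add _ _ hs)

-- A's count is a countP over the grid
theorem pvA_eq_countP (t : List (List String)) :
    verificar_tortugas t = ((pvGrid t).countP (pvPA t) : Int) := by
  unfold verificar_tortugas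
  have hinner : ∀ r : Int, (fun (invalid : Int) (col_num : Int) =>
      if pvCell t r col_num == "T" then
        if verificar_una_celda t (r, col_num) = false then invalid + 1 else invalid
      else invalid) = (fun invalid col_num =>
        if pvPA t (r, col_num) then invalid + 1 else invalid) := by
    intro r
    funext invalid col_num
    simp only [pvPA]
    by_cases h1 : pvCell t r col_num == "T"
    · by_cases h2 : verificar_una_celda t (r, col_num) = false <;> simp [h1, h2]
    · simp [h1]
  have houter : (fun (invalid : Int) (row_num : Int) =>
      (PySem.List.pyRange 0 t.length 1).foldl (fun invalid col_num =>
        if pvCell t row_num col_num == "T" then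
          if verificar_una_celda t (row_num, col_num) = false then invalid + 1 else invalid
        else invalid) invalid) = (fun invalid row_num =>
        invalid + (((PySem.List.pyRange 0 t.length 1).countP (fun c => pvPA t (row_num, c))) : Int)) := by
    funext invalid row_num
    rw [hinner row_num, PySem.List.foldl_if_add_one]
  rw [houter, PySem.List.foldl_add]
  have hprod : pvGrid t = (PySem.List.pyRange 0 t.length 1).flatMap
      (fun r => (PySem.List.pyRange 0 t.length 1).map (Prod.mk r)) := rfl
  rw [hprod, List.countP_flatMap]
  simp [Function.comp_def, List.countP_map]

-- B's set, membership-characterised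
theorem pvB_mem (t : List (List String)) (x : Int × Int) :
    x ∈ pvBSet t ↔ pvQH t x ∨ pvQV t x := by
  unfold pvBSet
  rw [pv_mem_foldl_step _ _ (fun r => ∃ c ∈ PySem.List.pyRange 0 ((t.length : Int)) 1,
        (pvCell t r c == "T" && pvCell t (r + 1) c == "T") = true ∧ (x = (r, c) ∨ x = (r + 1, c))) x ?hv,
      pv_mem_foldl_step _ _ (fun r => ∃ c ∈ PySem.List.pyRange 0 ((t.length : Int) - 1) 1,
        (pvCell t r c == "T" && pvCell t r (c + 1) == "T") = true ∧ (x = (r, c) ∨ x = (r, c + 1))) x ?hh]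
  case hv =>
    intro s r
    exact pv_mem_foldl_step _ _ (fun c => (pvCell t r c == "T" && pvCell t (r + 1) c == "T") = true ∧
      (x = (r, c) ∨ x = (r + 1, c))) x (fun s c => pv_mem_add2 s _ _ _ x) s
  case hh =>
    intro s r
    exact pv_mem_foldl_step _ _ (fun c => (pvCell t r c == "T" && pvCell t r (c + 1) == "T") = true ∧
      (x = (r, c) ∨ x = (r, c + 1))) x (fun s c => pv_mem_add2 s _ _ _ x) s
  simp only [PySem.Set.empty, List.not_mem_nil, false_or, PySem.List.mem_pyRange_one,
    Bool.and_eq_true, beq_iff_eq, pvQH, pvQV]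

theorem pvB_nodup (t : List (List String)) : (pvBSet t).Nodup := by
  unfold pvBSet
  apply pv_nodup_foldl_step
  · intro s r hs
    exact pv_nodup_foldl_step _ _ (fun s c hs => pv_nodup_add2 s _ _ _ hs) s hs
  · apply pv_nodup_foldl_step
    · intro s r hs
      exact pv_nodup_foldl_step _ _ (fun s c hs => pv_nodup_add2 s _ _ _ hs) s hs
    · simp [PySem.Set.empty]

-- A's four direction checks, read off
theorem pv_check_up_iff (t : List (List String)) (r c : Int) :
    check_up t r c = true ↔ (r ≠ 0 ∧ pvCell t (r - 1) c = "T") := by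
  by_cases h : r = 0
  · simp [check_up, h]
  · by_cases h2 : pvCell t (r - 1) c = "T" <;> simp [check_up, h, h2]

theorem pv_check_down_iff (t : List (List String)) (r c : Int) :
    check_down t r c = true ↔ (r ≠ (t.length : Int) - 1 ∧ pvCell t (r + 1) c = "T") := by
  by_cases h : r = (t.length : Int) - 1
  · simp [check_down, h]
  · by_cases h2 : pvCell t (r + 1) c = "T" <;> simp [check_down, h, h2]

theorem pv_check_left_iff (t : List (List String)) (r c : Int) :
    check_left t r c = true ↔ (c ≠ 0 ∧ pvCell t r (c - 1) = "T") := by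
  simp only [check_left]
  by_cases h : c = 0
  · simp [h]
  · by_cases h2 : pvCell t r (c - 1) = "T"
    · simp [h, h2]
    · simp [h, beq_eq_false_iff_ne.mpr (Ne.symm h2), h2]

theorem pv_check_right_iff (t : List (List String)) (r c : Int) :
    check_right t r c = true ↔ (c ≠ (t.length : Int) - 1 ∧ pvCell t r (c + 1) = "T") := by
  simp only [check_right]
  by_cases h : c = (t.length : Int) - 1
  · simp [h]
  · by_cases h2 : pvCell t r (c + 1) = "T"
    · simp [h, h2]
    · simp [h, beq_eq_false_iff_ne.mpr (Ne.symm h2), h2]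

theorem pv_una_celda_false_iff (t : List (List String)) (x : Int × Int) :
    verificar_una_celda t x = false ↔
      (check_up t x.1 x.2 = true ∨ check_down t x.1 x.2 = true ∨
       check_left t x.1 x.2 = true ∨ check_right t x.1 x.2 = true) := by
  cases hu : check_up t x.1 x.2 <;> cases hd : check_down t x.1 x.2 <;>
    cases hl : check_left t x.1 x.2 <;> cases hr : check_right t x.1 x.2 <;>
    simp [verificar_una_celda, hu, hd, hl, hr]

-- the pointwise crux: B's pair condition at x ↔ x is in the grid and A's test holds at x
theorem pv_pred_iff (t : List (List String)) (x : Int × Int) :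
    (pvQH t x ∨ pvQV t x) ↔ (x ∈ pvGrid t ∧ pvPA t x = true) := by
  have hgrid : ∀ a b : Int, ((a, b) ∈ pvGrid t) ↔
      ((0 ≤ a ∧ a < (t.length : Int)) ∧ (0 ≤ b ∧ b < (t.length : Int))) := by
    intro a b
    simp [pvGrid, List.mem_product, PySem.List.mem_pyRange_one]
  have hPA : ∀ a b : Int, pvPA t (a, b) = true ↔ (pvCell t a b = "T" ∧
      ((a ≠ 0 ∧ pvCell t (a - 1) b = "T") ∨ (a ≠ (t.length : Int) - 1 ∧ pvCell t (a + 1) b = "T") ∨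
       (b ≠ 0 ∧ pvCell t a (b - 1) = "T") ∨ (b ≠ (t.length : Int) - 1 ∧ pvCell t a (b + 1) = "T"))) := by
    intro a b
    simp only [pvPA, Bool.and_eq_true, beq_iff_eq, pv_una_celda_false_iff,
      pv_check_up_iff, pv_check_down_iff, pv_check_left_iff, pv_check_right_iff]
  constructor
  · rintro (⟨r, hr, c, hc, ⟨h1, h2⟩, rfl | rfl⟩ | ⟨r, hr, c, hc, ⟨h1, h2⟩, rfl | rfl⟩)
    · exact ⟨(hgrid r c).mpr ⟨hr, ⟨hc.1, by omega⟩⟩,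
        (hPA r c).mpr ⟨h1, Or.inr (Or.inr (Or.inr ⟨by omega, h2⟩))⟩⟩
    · refine ⟨(hgrid r (c + 1)).mpr ⟨hr, by omega⟩,
        (hPA r (c + 1)).mpr ⟨h2, Or.inr (Or.inr (Or.inl ⟨by omega, ?_⟩))⟩⟩
      simpa using h1
    · exact ⟨(hgrid r c).mpr ⟨⟨hr.1, by omega⟩, hc⟩,
        (hPA r c).mpr ⟨h1, Or.inr (Or.inl ⟨by omega, h2⟩)⟩⟩
    · refine ⟨(hgrid (r + 1) c).mpr ⟨by omega, hc⟩,
        (hPA (r + 1) c).mpr ⟨h2, Or.inl ⟨by omega, ?_⟩⟩⟩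
      simpa using h1
  · obtain ⟨a, b⟩ := x
    rw [hgrid a b, hPA a b]
    rintro ⟨⟨ha, hb⟩, hc, (⟨h0, hT⟩ | ⟨h0, hT⟩ | ⟨h0, hT⟩ | ⟨h0, hT⟩)⟩
    · refine Or.inr ⟨a - 1, ⟨by omega, by omega⟩, b, hb, ⟨hT, by simpa using hc⟩, Or.inr (by simp)⟩
    · exact Or.inr ⟨a, ⟨ha.1, by omega⟩, b, hb, ⟨hc, hT⟩, Or.inl rfl⟩
    · refine Or.inl ⟨a, ha, b - 1, ⟨by omega, by omega⟩, ⟨hT, by simpa using hc⟩, Or.inr (by simp)⟩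
    · exact Or.inl ⟨a, ha, b, ⟨hb.1, by omega⟩, ⟨hc, hT⟩, Or.inl rfl⟩

theorem pvGrid_nodup (t : List (List String)) : (pvGrid t).Nodup :=
  List.Nodup.product (PySem.List.nodup_pyRange_one _ _) (PySem.List.nodup_pyRange_one _ _)

-- ===== VERDICT (by name: the statement is the Claim_ definition above) =====
theorem verificar_tortugas_spec : Claim_equal_verificar_tortugas := by
  intro t _ _
  show verificar_tortugas t = verificar_tortugas_alt t
  rw [pvA_eq_countP, pvB_eq_len]
  have hperm : (pvBSet t).Perm ((pvGrid t).filter (pvPA t)) := by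
    rw [List.perm_ext_iff_of_nodup (pvB_nodup t) ((pvGrid_nodup t).filter _)]
    intro x
    rw [pvB_mem, pv_pred_iff, List.mem_filter]
  show (((pvGrid t).countP (pvPA t) : Int)) = ((pvBSet t).length : Int)
  rw [hperm.length_eq, List.countP_eq_length_filter]
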